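-- pv_equiv track=rewrite | github.com/ChronoNewton/varFile | Python/varFile.py | Get_Var_Parts
-- ===== SOURCE A (Python) =====
-- def Get_Var_Parts(var_line_text):
--     if('=' not in var_line_text and
--        ':' not in var_line_text and
--        '\t' not in var_line_text):#check variable line if may not be properly formated
--         raise Exception("varFile: var_line_text has no initializer(e.g. '=')\n" + "var_line_text:  " + var_line_text)
--
--     if(var_line_text[0] == '#' or
--        (var_line_text[0] == '/' and var_line_text[1] == '/') or
--        (var_line_text[0] == '-' and var_line_text[1] == '-')):#check variable line if may be a comment(starts with a comment mark)
--         raise Exception("varFile: var_line_text starts with a comment mark(e.g. '#')\n" + "var_line_text:  " + var_line_text)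
--
--     #three sections_parts:
--     # 1 = key
--     # 2 initializer
--     # 3 value
--     section_part='1'
--     part_key=''
--     part_initializer=''
--     part_value=''
--
--     for i in range(len(var_line_text)):
--         if section_part=='1':
--             if(var_line_text[i] != '=' and
--                var_line_text[i] != ':' and
--                var_line_text[i] != '\t'):
--                 part_key += var_line_text[i]
--             else:
--                 #section_part='2'
--                 part_initializer=var_line_text[i] #here section part 2 is completed, then proceed to section part 3
--                 section_part = '3'
--
--         elif section_part == '3':
--             part_value+= var_line_text[i]
--     return [part_key.strip(), part_initializer, part_value.strip()]
-- ===== SOURCE B (Python) =====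
-- def Get_Var_Parts(var_line_text):
--     if('=' not in var_line_text and
--        ':' not in var_line_text and
--        '\t' not in var_line_text):
--         raise Exception("varFile: var_line_text has no initializer(e.g. '=')\n" + "var_line_text:  " + var_line_text)
--
--     if(var_line_text[0] == '#' or
--        (var_line_text[0] == '/' and var_line_text[1] == '/') or
--        (var_line_text[0] == '-' and var_line_text[1] == '-')):
--         raise Exception("varFile: var_line_text starts with a comment mark(e.g. '#')\n" + "var_line_text:  " + var_line_text)
--
--     idx = min(i for i in (var_line_text.find(c) for c in '=:\t') if i != -1)
--     return [var_line_text[:idx].strip(), var_line_text[idx], var_line_text[idx + 1:].strip()]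
-- ===== Notes on version B (the rewrite author's own statement) =====
-- stated objective: simpler
-- what changed: A's character-by-character state machine (section_part flag, three accumulators) is replaced by computing the index of the first delimiter as the minimum of the successful str.find results for the three delimiter characters, then slicing the line into key / initializer / value.
import Mathlib
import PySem

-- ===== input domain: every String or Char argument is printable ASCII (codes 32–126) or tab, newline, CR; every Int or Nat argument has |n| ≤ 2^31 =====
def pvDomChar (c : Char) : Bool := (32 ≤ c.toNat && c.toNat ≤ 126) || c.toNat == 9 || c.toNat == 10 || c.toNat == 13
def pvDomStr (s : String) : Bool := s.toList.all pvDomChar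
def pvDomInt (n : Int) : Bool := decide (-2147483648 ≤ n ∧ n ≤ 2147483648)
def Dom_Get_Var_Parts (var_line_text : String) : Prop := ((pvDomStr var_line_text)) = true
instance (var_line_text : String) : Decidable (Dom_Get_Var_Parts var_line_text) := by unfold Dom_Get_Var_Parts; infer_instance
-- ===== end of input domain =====

-- B replaces A's character-by-character state machine by find-the-first-delimiter + slicing (objective: simpler).

-- ===== PORT A =====
-- A's for-loop over the characters: state = (section_part, part_key, part_initializer, part_value)
def gvpLoop (sec : Char) (key init val : List Char) : List Char → Char × List Char × List Char × List Char
  | [] => (sec, key, init, val)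
  | c :: rest =>
    if sec == '1' then
      if !(c == '=') && !(c == ':') && !(c == '\t') then
        gvpLoop sec (key ++ [c]) init val rest
      else
        gvpLoop '3' key [c] val rest
    else if sec == '3' then
      gvpLoop sec key init (val ++ [c]) rest
    else
      gvpLoop sec key init val rest

def Get_Var_Parts (var_line_text : String) : List String :=
  if !(PySem.Str.isIn "=" var_line_text) && !(PySem.Str.isIn ":" var_line_text) &&
     !(PySem.Str.isIn "\t" var_line_text) then
    []  -- Python raises Exception here (excluded by Pre_)
  else if (PySem.Str.pyGet? var_line_text 0 == some '#') ||
          (PySem.Str.pyGet? var_line_text 0 == some '/' && PySem.Str.pyGet? var_line_text 1 == some '/') ||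
          (PySem.Str.pyGet? var_line_text 0 == some '-' && PySem.Str.pyGet? var_line_text 1 == some '-') then
    []  -- Python raises Exception here (excluded by Pre_)
  else
    let r := gvpLoop '1' [] [] [] var_line_text.toList
    [String.ofList (PySem.Chars.strip r.2.1), String.ofList r.2.2.1, String.ofList (PySem.Chars.strip r.2.2.2)]

-- ===== PORT B =====
def Get_Var_Parts_alt (var_line_text : String) : List String :=
  if !(PySem.Str.isIn "=" var_line_text) && !(PySem.Str.isIn ":" var_line_text) &&
     !(PySem.Str.isIn "\t" var_line_text) then
    []  -- Python raises Exception here (excluded by Pre_)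
  else if (PySem.Str.pyGet? var_line_text 0 == some '#') ||
          (PySem.Str.pyGet? var_line_text 0 == some '/' && PySem.Str.pyGet? var_line_text 1 == some '/') ||
          (PySem.Str.pyGet? var_line_text 0 == some '-' && PySem.Str.pyGet? var_line_text 1 == some '-') then
    []  -- Python raises Exception here (excluded by Pre_)
  else
    let cs := var_line_text.toList
    let finds := [PySem.Chars.find cs ['='], PySem.Chars.find cs [':'],
                  PySem.Chars.find cs ['\t']].filter (fun i => i ≠ -1)
    match PySem.List.min? finds (fun i => i) with
    | none => []  -- unreachable under Pre_ (Python's min over an empty generator)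
    | some idx =>
      match PySem.Chars.pyGet? cs idx with
      | none => []  -- unreachable: idx is a successful find result
      | some c =>
        [String.ofList (PySem.Chars.strip (PySem.Chars.slice cs none (some idx))),
         String.ofList [c],
         String.ofList (PySem.Chars.strip (PySem.Chars.slice cs (some (idx + 1)) none))]

-- ===== PRECONDITION & SPEC =====
-- Pre_ excludes exactly the inputs on which the Python A raises: lines containing none of the
-- three delimiter characters, and lines starting with one of the three comment marks.
def Pre_Get_Var_Parts (var_line_text : String) : Prop :=
  (PySem.Str.isIn "=" var_line_text = true ∨ PySem.Str.isIn ":" var_line_text = true ∨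
   PySem.Str.isIn "\t" var_line_text = true) ∧
  ¬(PySem.Str.pyGet? var_line_text 0 = some '#' ∨
    (PySem.Str.pyGet? var_line_text 0 = some '/' ∧ PySem.Str.pyGet? var_line_text 1 = some '/') ∨
    (PySem.Str.pyGet? var_line_text 0 = some '-' ∧ PySem.Str.pyGet? var_line_text 1 = some '-'))
instance (var_line_text : String) : Decidable (Pre_Get_Var_Parts var_line_text) := by
  unfold Pre_Get_Var_Parts; infer_instance
def pvWitness_Get_Var_Parts : String := " key = value "
def Spec_Get_Var_Parts (var_line_text : String) (out : List String) : Prop := out = Get_Var_Parts_alt var_line_text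
instance (var_line_text : String) (out : List String) : Decidable (Spec_Get_Var_Parts var_line_text out) := by unfold Spec_Get_Var_Parts; infer_instance

-- ===== CLAIM (what is proved, stated in full; the proofs are below) =====
def Claim_equal_Get_Var_Parts : Prop := ∀ (var_line_text : String), Dom_Get_Var_Parts var_line_text → Pre_Get_Var_Parts var_line_text → Spec_Get_Var_Parts var_line_text (Get_Var_Parts var_line_text)

-- ===== LEMMAS AND PROOFS =====
def gvpDelim (c : Char) : Bool := c == '=' || c == ':' || c == '\t'

-- phase '3' just appends the rest of the line to part_value
lemma gvpLoop_phase3 (l : List Char) : ∀ key init val,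
    gvpLoop '3' key init val l = ('3', key, init, val ++ l) := by
  induction l with
  | nil => intro key init val; simp [gvpLoop]
  | cons c rest ih => intro key init val; simp [gvpLoop, ih]

-- phase '1' consumes the delimiter-free prefix into part_key, then switches
lemma gvpLoop_phase1 (pre : List Char) : ∀ (d : Char) (post key init val : List Char),
    (∀ c ∈ pre, gvpDelim c = false) → gvpDelim d = true →
    gvpLoop '1' key init val (pre ++ d :: post) = ('3', key ++ pre, [d], val ++ post) := by
  induction pre with
  | nil =>
    intro d post key init val _ hd
    have hcond : (!(d == '=') && !(d == ':') && !(d == '\t')) = false := by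
      cases h1 : d == '=' <;> cases h2 : d == ':' <;> cases h3 : d == '\t' <;>
        simp_all [gvpDelim]
    simp [gvpLoop, hcond, gvpLoop_phase3]
  | cons c pre ih =>
    intro d post key init val hpre hd
    have hc : gvpDelim c = false := hpre c (by simp)
    simp only [gvpDelim, Bool.or_eq_false_iff, beq_eq_false_iff_ne] at hc
    obtain ⟨⟨h1, h2⟩, h3⟩ := hc
    have hcond : (!(c == '=') && !(c == ':') && !(c == '\t')) = true := by simp [h1, h2, h3]
    simp [gvpLoop, hcond, ih d post (key ++ [c]) init val (fun x hx => hpre x (by simp [hx])) hd]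

lemma singleton_prefix_iff (c : Char) (l : List Char) : [c] <+: l ↔ l.head? = some c := by
  constructor
  · rintro ⟨t, rfl⟩; rfl
  · intro h
    cases l with
    | nil => simp at h
    | cons a t => simp at h; exact ⟨t, by simp [h]⟩

-- a successful single-character find points at the first occurrence of that character
lemma find_char_spec (cs : List Char) (c : Char) (h : 0 ≤ PySem.Chars.find cs [c]) :
    cs[(PySem.Chars.find cs [c]).toNat]? = some c ∧
    ∀ i < (PySem.Chars.find cs [c]).toNat, cs[i]? ≠ some c := by
  obtain ⟨h1, h2⟩ := PySem.Chars.find_spec h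
  rw [singleton_prefix_iff, List.head?_drop] at h1
  refine ⟨h1, fun i hi hc => ?_⟩
  exact h2 i hi (by rw [singleton_prefix_iff, List.head?_drop]; exact hc)

-- the minimum of the successful finds is the index of the first delimiter
lemma min_finds_spec (cs : List Char) (m : Int)
    (hm : PySem.List.min? (([PySem.Chars.find cs ['='], PySem.Chars.find cs [':'],
            PySem.Chars.find cs ['\t']].filter (fun i => i ≠ -1))) (fun i => i) = some m) :
    0 ≤ m ∧ (∃ d, cs[m.toNat]? = some d ∧ gvpDelim d = true) ∧
      ∀ i < m.toNat, ∀ c, cs[i]? = some c → gvpDelim c = false := by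
  have hmem := PySem.List.min?_mem hm
  have hmin := PySem.List.min?_isMin hm
  simp only [List.mem_filter, List.mem_cons, List.not_mem_nil, or_false, decide_eq_true_eq] at hmem hmin
  obtain ⟨hone, hne⟩ := hmem
  have hm0 : 0 ≤ m := by
    have hge : -1 ≤ m := by
      rcases hone with h | h | h <;> (rw [h]; exact PySem.Chars.neg_one_le_find cs _)
    rcases eq_or_lt_of_le hge with h | h
    · exact absurd h.symm hne
    · omega
  refine ⟨hm0, ?_, ?_⟩
  · rcases hone with h | h | h <;>
    · have := find_char_spec cs _ (by rw [← h]; exact hm0)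
      rw [← h] at this
      exact ⟨_, this.1, by simp [gvpDelim]⟩
  · intro i hi c hc
    by_contra hdc
    rw [Bool.not_eq_false, gvpDelim, Bool.or_eq_true, Bool.or_eq_true] at hdc
    simp only [beq_iff_eq] at hdc
    have hfind0 : 0 ≤ PySem.Chars.find cs [c] := by
      rw [PySem.Chars.find_nonneg_iff]
      exact List.infix_iff_prefix_suffix.mpr ⟨_, singleton_prefix_iff c _ |>.mpr
        (by rw [List.head?_drop]; exact hc), List.drop_suffix i cs⟩
    have hspec := find_char_spec cs c hfind0
    have hle : (PySem.Chars.find cs [c]).toNat ≤ i := by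
      by_contra hgt
      exact hspec.2 i (by omega) hc
    have hmem3 : PySem.Chars.find cs [c] = PySem.Chars.find cs ['='] ∨
        PySem.Chars.find cs [c] = PySem.Chars.find cs [':'] ∨
        PySem.Chars.find cs [c] = PySem.Chars.find cs ['\t'] := by
      rcases hdc with (rfl | rfl) | rfl <;> simp
    have hmle : m ≤ PySem.Chars.find cs [c] := hmin _ ⟨hmem3, by omega⟩
    omega

-- ===== VERDICT (by name: the statement is the Claim_ definition above) =====
theorem Get_Var_Parts_spec : Claim_equal_Get_Var_Parts := by
  intro t _ hpre
  obtain ⟨hdelim, hcmt⟩ := hpre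
  unfold Spec_Get_Var_Parts Get_Var_Parts Get_Var_Parts_alt
  -- the two guards are identical in both ports and false under Pre_
  have hg1 : (!(PySem.Str.isIn "=" t) && !(PySem.Str.isIn ":" t) && !(PySem.Str.isIn "\t" t)) = false := by
    rcases hdelim with h | h | h <;> simp_all
  have hg2 : ((PySem.Str.pyGet? t 0 == some '#') ||
          (PySem.Str.pyGet? t 0 == some '/' && PySem.Str.pyGet? t 1 == some '/') ||
          (PySem.Str.pyGet? t 0 == some '-' && PySem.Str.pyGet? t 1 == some '-')) = false := by
    have h1 : ¬(PySem.Str.pyGet? t 0 = some '#') := fun h => hcmt (Or.inl h)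
    have h2 : ¬(PySem.Str.pyGet? t 0 = some '/' ∧ PySem.Str.pyGet? t 1 = some '/') :=
      fun h => hcmt (Or.inr (Or.inl h))
    have h3 : ¬(PySem.Str.pyGet? t 0 = some '-' ∧ PySem.Str.pyGet? t 1 = some '-') :=
      fun h => hcmt (Or.inr (Or.inr h))
    by_cases e1 : PySem.Str.pyGet? t 0 = some '/' <;>
    by_cases e2 : PySem.Str.pyGet? t 0 = some '-' <;>
      simp_all
  rw [hg1, hg2]
  simp only [Bool.false_eq_true, if_false]
  -- the min of the finds exists
  set cs := t.toList with hcs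
  have hfinds : ∃ m, PySem.List.min? (([PySem.Chars.find cs ['='], PySem.Chars.find cs [':'],
      PySem.Chars.find cs ['\t']].filter (fun i => i ≠ -1))) (fun i => i) = some m := by
    cases hn : PySem.List.min? (([PySem.Chars.find cs ['='], PySem.Chars.find cs [':'],
        PySem.Chars.find cs ['\t']].filter (fun i => i ≠ -1))) (fun i => i) with
    | some m => exact ⟨m, rfl⟩
    | none =>
      exfalso
      rw [PySem.List.min?_eq_none_iff, List.filter_eq_nil_iff] at hn
      rcases hdelim with h | h | h <;>
      · simp only [pysem, show ("=" : String).toList = ['='] from rfl,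
          show (":" : String).toList = [':'] from rfl,
          show ("\t" : String).toList = ['\t'] from rfl] at h
        rw [← PySem.Chars.find_ne_neg_one_iff, ← hcs] at h
        exact h (by simpa using hn _ (by simp))
  obtain ⟨m, hm⟩ := hfinds
  rw [hm]
  obtain ⟨hm0, ⟨d, hd, hdelim'⟩, hmin⟩ := min_finds_spec cs m hm
  set j := m.toNat with hj
  have hjlen : j < cs.length := by
    by_contra h
    rw [List.getElem?_eq_none (by omega)] at hd
    simp at hd
  have hdj : cs[j] = d := by
    rw [List.getElem?_eq_getElem hjlen] at hd
    exact Option.some_injective _ hd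
  -- B's pieces
  have hget : PySem.Chars.pyGet? cs m = some d := by
    have : m = ((j : Nat) : Int) := by omega
    rw [this]
    simp only [PySem.Chars.pyGet?_eq_listPyGet?, PySem.List.pyGet?_natCast]
    exact hd
  simp only [hget]
  have hsl1 : PySem.Chars.slice cs none (some m) = cs.take j := by
    simp only [PySem.Chars.slice_eq_listSlice]
    rw [PySem.List.slice_to _ hm0]
  have hsl2 : PySem.Chars.slice cs (some (m + 1)) none = cs.drop (j + 1) := by
    simp only [PySem.Chars.slice_eq_listSlice]
    rw [PySem.List.slice_from _ (by omega)]
    congr 1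
    omega
  rw [hsl1, hsl2]
  -- A's loop on the decomposition cs = take j ++ cs[j] :: drop (j+1)
  have hsplit : cs = cs.take j ++ d :: cs.drop (j + 1) := by
    conv_lhs => rw [← List.take_append_drop j cs]
    rw [List.drop_eq_getElem_cons hjlen, hdj]
  have hpre_free : ∀ c ∈ cs.take j, gvpDelim c = false := by
    intro c hc
    obtain ⟨i, hi, hgi⟩ := List.mem_take_iff_getElem.mp hc
    have hij : i < j := lt_of_lt_of_le hi (min_le_left _ _)
    have hil : i < cs.length := lt_of_lt_of_le hi (min_le_right _ _)
    exact hmin i hij c (by rw [List.getElem?_eq_getElem hil]; exact congrArg some hgi)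
  conv_lhs => rw [hsplit]
  rw [show gvpLoop '1' [] [] [] (cs.take j ++ d :: cs.drop (j+1)) =
        ('3', [] ++ cs.take j, [d], [] ++ cs.drop (j+1)) from
      gvpLoop_phase1 _ d _ [] [] [] hpre_free hdelim']
  simp
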